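-- pv_equiv track=rewrite | github.com/really-no-name/PersonalLeetCode | Code/LCP/LCP_068/LCP_068.py | beautifulBouquet
-- ===== SOURCE A (Python) =====
-- from collections import Counter
-- from typing import List
--
-- def beautifulBouquet(flowers: List[int], cnt: int) -> int:
--     count = Counter()
--     ans = 0
--     left = 0
--     for right, flower in enumerate(flowers):
--         count[flower] += 1
--
--         while max(count.values()) > cnt:
--             count[flowers[left]] -= 1
--             left += 1
--
--         ans += right - left + 1
--
--     return ans
-- ===== SOURCE B (Python) =====
-- def beautifulBouquet(flowers, cnt):
--     # O(n), no shrink loop: keep each value's occurrence positions; when x gets its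
--     # k-th occurrence with k > cnt, the window must start right after the (k-cnt)-th
--     # occurrence of x, so left jumps there directly.
--     pos = {}
--     ans = 0
--     left = 0
--     for right, x in enumerate(flowers):
--         occ = pos.setdefault(x, [])
--         occ.append(right)
--         if len(occ) > cnt:
--             left = max(left, occ[len(occ) - cnt - 1] + 1)
--         ans += right - left + 1
--     return ans
-- ===== Notes on version B (the rewrite author's own statement) =====
-- stated objective: faster
-- what changed: Replaces the count dictionary with per-step max scan and shrink loop by a dictionary of occurrence-position lists: when a value reaches more than cnt occurrences, left jumps directly past its (k-cnt)-th occurrence (left = max(left, occ[k-cnt-1]+1)), so there is no inner while loop and no counter maintenance at all.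
import Mathlib
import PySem

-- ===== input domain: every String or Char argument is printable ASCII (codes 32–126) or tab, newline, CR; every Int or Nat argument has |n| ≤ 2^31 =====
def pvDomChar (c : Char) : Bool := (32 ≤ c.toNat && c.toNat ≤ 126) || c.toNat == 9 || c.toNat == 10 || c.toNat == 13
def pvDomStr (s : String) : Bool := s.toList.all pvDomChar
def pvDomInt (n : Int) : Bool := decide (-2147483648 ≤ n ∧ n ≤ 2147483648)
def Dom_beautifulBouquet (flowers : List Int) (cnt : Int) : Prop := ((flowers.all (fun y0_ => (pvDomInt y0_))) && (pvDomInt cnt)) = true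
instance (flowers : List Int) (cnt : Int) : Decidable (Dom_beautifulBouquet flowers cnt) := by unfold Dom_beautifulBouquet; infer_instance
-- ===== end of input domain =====

-- B replaces A's count dictionary + per-step max scan + shrink loop by a dictionary of
-- occurrence-position lists: left jumps directly past the (k-cnt)-th occurrence of the
-- current value, with no inner loop (objective: faster).

-- ===== PORT A =====
-- max(count.values()) (Python raises on an empty dict; at every call site the dict is nonempty)
def pvMaxVal (d : PySem.Dict Int Int) : Int :=
  (PySem.List.max? d.values (fun v => v)).getD 0

-- the 'while max(count.values()) > cnt: count[flowers[left]] -= 1; left += 1' loop;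
-- when left runs off the list Python raises IndexError (outside Pre_), we stop.
def pvInnerA (flowers : List Int) (cnt : Int) (count : PySem.Dict Int Int) (left : Nat) :
    PySem.Dict Int Int × Nat :=
  if pvMaxVal count > cnt then
    if h : left < flowers.length then
      pvInnerA flowers cnt (count.modify flowers[left] 0 (· - 1)) (left + 1)
    else (count, left)
  else (count, left)
termination_by flowers.length - left

def pvStepA (flowers : List Int) (cnt : Int)
    (s : PySem.Dict Int Int × Int × Nat) (p : Int × Int) : PySem.Dict Int Int × Int × Nat :=
  let count := s.1.modify p.2 0 (· + 1)          -- count[flower] += 1 (Counter)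
  let r := pvInnerA flowers cnt count s.2.2
  (r.1, s.2.1 + (p.1 - (r.2 : Int) + 1), r.2)    -- ans += right - left + 1

def beautifulBouquet (flowers : List Int) (cnt : Int) : Int :=
  ((PySem.List.enumerate flowers).foldl (pvStepA flowers cnt) (PySem.Dict.empty, 0, 0)).2.1

-- ===== PORT B =====
-- occ = pos.setdefault(x, []); occ.append(right);
-- if len(occ) > cnt: left = max(left, occ[len(occ)-cnt-1] + 1); ans += right - left + 1.
-- occ[len(occ)-cnt-1] is ported with pyGet?; the '.getD 0' only fires where Python would
-- raise IndexError (cnt < 0 with nonempty flowers), which is outside Pre_.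
def pvStepB (cnt : Int) (s : PySem.Dict Int (List Int) × Int × Int) (p : Int × Int) :
    PySem.Dict Int (List Int) × Int × Int :=
  let occ := s.1.getD p.2 [] ++ [p.1]
  let d := s.1.insert p.2 occ
  let left := if ((occ.length : Int) > cnt) then
      max s.2.2 (((PySem.List.pyGet? occ ((occ.length : Int) - cnt - 1)).getD 0) + 1)
    else s.2.2
  (d, s.2.1 + (p.1 - left + 1), left)

def beautifulBouquet_alt (flowers : List Int) (cnt : Int) : Int :=
  ((PySem.List.enumerate flowers).foldl (pvStepB cnt) (PySem.Dict.empty, 0, 0)).2.1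

-- ===== PRECONDITION & SPEC =====
-- Pre_ excludes cnt < 0 with nonempty flowers: there A's shrink loop runs past the list
-- end and raises IndexError (B raises IndexError on its occurrence lookup too).
def Pre_beautifulBouquet (flowers : List Int) (cnt : Int) : Prop :=
  flowers = [] ∨ 0 ≤ cnt
instance (flowers : List Int) (cnt : Int) : Decidable (Pre_beautifulBouquet flowers cnt) := by
  unfold Pre_beautifulBouquet; infer_instance

def pvWitness_beautifulBouquet : List Int × Int := ([1, 2, 1, 1, 3], 2)

def Spec_beautifulBouquet (flowers : List Int) (cnt : Int) (out : Int) : Prop := out = beautifulBouquet_alt flowers cnt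
instance (flowers : List Int) (cnt : Int) (out : Int) : Decidable (Spec_beautifulBouquet flowers cnt out) := by unfold Spec_beautifulBouquet; infer_instance

-- ===== CLAIM (what is proved, stated in full; the proofs are below) =====
def Claim_equal_beautifulBouquet : Prop := ∀ (flowers : List Int) (cnt : Int), Dom_beautifulBouquet flowers cnt → Pre_beautifulBouquet flowers cnt → Spec_beautifulBouquet flowers cnt (beautifulBouquet flowers cnt)

-- ===== LEMMAS AND PROOFS =====

-- countIn l L = how many occurrences in l are ≥ L (the count of a value inside window [L, r])
def countIn (l : List Int) (L : Int) : Int := ((l.filter (fun e => decide (L ≤ e))).length : Int)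

-- the positions of value v among the first r elements of fl, as Ints, increasing
def occUpTo (fl : List Int) (v : Int) (r : Nat) : List Int :=
  ((List.range r).filter (fun i => decide (fl.getD i (v + 1) = v))).map (fun i => ((i : Nat) : Int))

theorem countIn_nil (L : Int) : countIn [] L = 0 := rfl

theorem countIn_cons (a : Int) (l : List Int) (L : Int) :
    countIn (a :: l) L = (if L ≤ a then 1 else 0) + countIn l L := by
  by_cases h : L ≤ a <;> simp [countIn, List.filter_cons, h] <;> push_cast <;> omega

theorem countIn_append (l₁ l₂ : List Int) (L : Int) :
    countIn (l₁ ++ l₂) L = countIn l₁ L + countIn l₂ L := by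
  simp [countIn, List.filter_append]

theorem countIn_le_length (l : List Int) (L : Int) : countIn l L ≤ (l.length : Int) := by
  unfold countIn; exact_mod_cast List.length_filter_le _ _

theorem countIn_mono (l : List Int) {M M' : Int} (h : M ≤ M') : countIn l M' ≤ countIn l M := by
  induction l with
  | nil => simp [countIn_nil]
  | cons a l ih =>
    rw [countIn_cons, countIn_cons]
    split_ifs with h1 h2 <;> omega

theorem countIn_all_lt (l : List Int) (L : Int) (h : ∀ e ∈ l, e < L) : countIn l L = 0 := by
  induction l with
  | nil => rfl
  | cons a l ih =>
    rw [countIn_cons]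
    have := h a (by simp)
    rw [if_neg (by omega), ih (fun e he => h e (by simp [he]))]
    omega

theorem countIn_all_ge (l : List Int) (L : Int) (h : ∀ e ∈ l, L ≤ e) :
    countIn l L = (l.length : Int) := by
  induction l with
  | nil => rfl
  | cons a l ih =>
    rw [countIn_cons, if_pos (h a (by simp)), ih (fun e he => h e (by simp [he]))]
    simp only [List.length_cons]; push_cast; ring

theorem countIn_pos (l : List Int) (L : Int) (h : 0 < countIn l L) : ∃ e ∈ l, L ≤ e := by
  induction l with
  | nil => simp [countIn_nil] at h
  | cons a l ih =>
    rw [countIn_cons] at h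
    by_cases ha : L ≤ a
    · exact ⟨a, by simp, ha⟩
    · rw [if_neg ha] at h
      obtain ⟨e, he, hL⟩ := ih (by omega)
      exact ⟨e, by simp [he], hL⟩

theorem countIn_not_mem (l : List Int) (L : Int) (h : L ∉ l) :
    countIn l (L + 1) = countIn l L := by
  induction l with
  | nil => rfl
  | cons a l ih =>
    rw [countIn_cons, countIn_cons, ih (fun hm => h (by simp [hm]))]
    have ha : a ≠ L := fun he => h (by simp [he])
    split_ifs <;> omega

theorem countIn_shift (l : List Int) (L : Int) (hnd : l.Nodup) :
    countIn l (L + 1) = countIn l L - (if L ∈ l then 1 else 0) := by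
  induction l with
  | nil => simp [countIn_nil]
  | cons a l ih =>
    rw [List.nodup_cons] at hnd
    rw [countIn_cons, countIn_cons, ih hnd.2]
    simp only [List.mem_cons]
    by_cases ha : L = a
    · subst ha
      simp only [true_or, if_pos, countIn_not_mem l L hnd.1]
      have : L ∉ l := hnd.1
      rw [if_neg this]
      split_ifs <;> omega
    · simp only [ha, false_or]
      split_ifs <;> omega

-- membership in occUpTo
theorem mem_occUpTo (fl : List Int) (v : Int) (r : Nat) (i : Nat) :
    ((i : Int) ∈ occUpTo fl v r) ↔ (i < r ∧ fl.getD i (v + 1) = v) := by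
  simp [occUpTo, List.mem_filter, List.mem_range]

theorem occUpTo_elem (fl : List Int) (v : Int) (r : Nat) (e : Int) (he : e ∈ occUpTo fl v r) :
    ∃ i : Nat, e = (i : Int) ∧ i < r := by
  simp only [occUpTo, List.mem_map, List.mem_filter, List.mem_range] at he
  obtain ⟨i, ⟨hi, _⟩, rfl⟩ := he
  exact ⟨i, rfl, hi⟩

theorem pairwise_occUpTo (fl : List Int) (v : Int) (r : Nat) :
    (occUpTo fl v r).Pairwise (· < ·) := by
  apply List.Pairwise.map
  · intro a b h
    exact_mod_cast h
  · exact List.Pairwise.sublist List.filter_sublist List.pairwise_lt_range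

theorem nodup_occUpTo (fl : List Int) (v : Int) (r : Nat) : (occUpTo fl v r).Nodup :=
  (pairwise_occUpTo fl v r).imp (fun h => ne_of_lt h)

theorem occUpTo_succ (fl : List Int) (v : Int) (r : Nat) :
    occUpTo fl v (r + 1) =
      occUpTo fl v r ++ (if fl.getD r (v + 1) = v then [(r : Int)] else []) := by
  simp only [occUpTo, List.range_succ, List.filter_append, List.map_append]
  congr 1
  by_cases h : fl.getD r (v + 1) = v
  · rw [if_pos h, List.filter_cons, if_pos (by simpa using h)]
    simp
  · rw [if_neg h, List.filter_cons, if_neg (by simpa using h)]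
    simp

-- the count of a sorted-increasing list at one of its elements / just past it
theorem countIn_sorted_at (l : List Int) (hs : l.Pairwise (· < ·)) :
    ∀ (j : Nat) (hj : j < l.length),
      countIn l l[j] = (l.length : Int) - j ∧
      countIn l (l[j] + 1) = (l.length : Int) - j - 1 := by
  induction l with
  | nil => intro j hj; simp at hj
  | cons a l ih =>
    rw [List.pairwise_cons] at hs
    intro j hj
    cases j with
    | zero =>
      simp only [List.getElem_cons_zero, countIn_cons, if_pos le_rfl, List.length_cons]
      rw [if_neg (by omega), countIn_all_ge l a (fun e he => le_of_lt (hs.1 e he)),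
        countIn_all_ge l (a + 1) (fun e he => by have := hs.1 e he; omega)]
      constructor <;> (push_cast; ring_nf) <;> omega
    | succ j =>
      simp only [List.length_cons] at hj
      have hj' : j < l.length := by omega
      have hlt : a < l[j] := hs.1 _ (List.getElem_mem hj')
      obtain ⟨h1, h2⟩ := ih hs.2 j hj'
      simp only [List.getElem_cons_succ, countIn_cons, List.length_cons]
      rw [if_neg (by omega), if_neg (by omega), h1, h2]
      constructor <;> (push_cast; ring_nf) <;> omega

-- ===== A-side counter lemmas (Counter/modify = insert; max-vs-current condition) =====
theorem pv_modify_eq_insert (d : PySem.Dict Int Int) (k v : Int) (f : Int → Int) :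
    d.modify k v f = d.insert k (f (d.getD k v)) := rfl

theorem pv_mem_values_iff (d : PySem.Dict Int Int) (v : Int) :
    v ∈ d.values ↔ ∃ k, (k, v) ∈ d.items := by
  simp only [PySem.Dict.values, List.mem_map]
  constructor
  · rintro ⟨⟨k, w⟩, hm, rfl⟩; exact ⟨k, hm⟩
  · rintro ⟨k, hm⟩; exact ⟨(k, v), hm, rfl⟩

-- the 'max(count.values()) > cnt' condition agrees with 'count[x] > cnt'
-- while every other key's count is ≤ cnt
theorem pv_cond_iff (d : PySem.Dict Int Int) (cnt x : Int) (hc : 0 ≤ cnt)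
    (hnd : d.keys.Nodup) (H : ∀ k, k ≠ x → d.getD k 0 ≤ cnt) :
    (pvMaxVal d > cnt) ↔ (d.getD x 0 > cnt) := by
  constructor
  · intro hmax
    rcases hm : PySem.List.max? d.values (fun v => v) with _ | m
    · simp [pvMaxVal, hm] at hmax; omega
    · have hmv : pvMaxVal d = m := by simp [pvMaxVal, hm]
      have hmem : m ∈ d.values := PySem.List.max?_mem hm
      rcases (pv_mem_values_iff d m).1 hmem with ⟨k, hk⟩
      have hgk : d.getD k 0 = m := PySem.Dict.getD_of_mem_items d hk hnd 0
      by_cases hkx : k = x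
      · subst hkx; omega
      · have := H k hkx; omega
  · intro hx
    have hne : d.get? x ≠ none := by
      intro hn; rw [PySem.Dict.getD_eq_get?_getD, hn] at hx; simp at hx; omega
    rcases hg : d.get? x with _ | v
    · exact absurd hg hne
    · have hv : v ∈ d.values := (pv_mem_values_iff d v).2 ⟨x, PySem.Dict.mem_items_of_get?_eq_some d hg⟩
      rcases hm : PySem.List.max? d.values (fun v => v) with _ | m
      · rw [PySem.List.max?_eq_none_iff] at hm; simp [hm] at hv
      · have hle : v ≤ m := PySem.List.max?_isMax hm v hv
        have hmv : pvMaxVal d = m := by simp [pvMaxVal, hm]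
        rw [PySem.Dict.getD_eq_get?_getD, hg] at hx
        simp only [Option.getD_some] at hx
        omega

-- ===== the inner while loop of A, characterised by window counts =====
-- result left L' is the first valid point ≥ L; counts become window counts at L'
theorem pv_innerA_spec (flowers : List Int) (cnt : Int) (hc : 0 ≤ cnt) (x : Int) (r : Nat)
    (hr : r < flowers.length) :
    ∀ (n : Nat) (count : PySem.Dict Int Int) (L : Nat), r + 1 - L ≤ n → L ≤ r + 1 →
    count.keys.Nodup →
    (∀ v, count.getD v 0 = countIn (occUpTo flowers v (r + 1)) (L : Int)) →
    (∀ v, v ≠ x → count.getD v 0 ≤ cnt) →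
    L ≤ (pvInnerA flowers cnt count L).2 ∧
    (pvInnerA flowers cnt count L).2 ≤ r + 1 ∧
    (pvInnerA flowers cnt count L).1.keys.Nodup ∧
    (∀ v, (pvInnerA flowers cnt count L).1.getD v 0 =
      countIn (occUpTo flowers v (r + 1)) (((pvInnerA flowers cnt count L).2 : Nat) : Int)) ∧
    countIn (occUpTo flowers x (r + 1)) (((pvInnerA flowers cnt count L).2 : Nat) : Int) ≤ cnt ∧
    (∀ M : Nat, L ≤ M → M < (pvInnerA flowers cnt count L).2 →
      cnt < countIn (occUpTo flowers x (r + 1)) (M : Int)) := by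
  intro n
  induction n with
  | zero =>
    intro count L hfuel hLr hnd Hc Hother
    have hL : L = r + 1 := by omega
    subst hL
    have hcx : count.getD x 0 ≤ cnt := by
      rw [Hc x, countIn_all_lt]
      · exact hc
      · intro e he
        obtain ⟨i, rfl, hi⟩ := occUpTo_elem _ _ _ _ he
        exact_mod_cast hi
    have hcond : ¬ pvMaxVal count > cnt := by
      rw [pv_cond_iff count cnt x hc hnd Hother]
      omega
    rw [pvInnerA, if_neg hcond]
    refine ⟨le_rfl, le_rfl, hnd, Hc, ?_, fun M h1 h2 => absurd h2 (by omega)⟩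
    rw [← Hc x]; exact hcx
  | succ n ih =>
    intro count L hfuel hLr hnd Hc Hother
    by_cases hcond : pvMaxVal count > cnt
    · -- invalid at L: count x > cnt, so some occurrence ≥ L exists, hence L ≤ r < len
      have hcx : cnt < count.getD x 0 := (pv_cond_iff count cnt x hc hnd Hother).1 hcond
      have hpos : 0 < countIn (occUpTo flowers x (r + 1)) (L : Int) := by
        rw [← Hc x]; omega
      obtain ⟨e, he, hLe⟩ := countIn_pos _ _ hpos
      obtain ⟨i, rfl, hi⟩ := occUpTo_elem _ _ _ _ he
      have hLle : L ≤ i := by exact_mod_cast hLe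
      have hLlt : L < flowers.length := by omega
      have hLr' : L ≤ r := by omega
      set y := flowers[L] with hy
      have hstep : count.modify y 0 (· - 1) = count.insert y (count.getD y 0 - 1) :=
        pv_modify_eq_insert count y 0 (· - 1)
      have hnd' : (count.insert y (count.getD y 0 - 1)).keys.Nodup :=
        PySem.Dict.nodup_keys_insert _ _ _ hnd
      -- the updated counts are the window counts at L+1
      have Hc' : ∀ v, (count.insert y (count.getD y 0 - 1)).getD v 0 =
          countIn (occUpTo flowers v (r + 1)) ((L : Int) + 1) := by
        intro v
        have hmem : ((L : Int) ∈ occUpTo flowers v (r + 1)) ↔ v = y := by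
          rw [mem_occUpTo]
          constructor
          · rintro ⟨_, hg⟩
            rw [List.getD_eq_getElem?_getD, List.getElem?_eq_getElem hLlt] at hg
            simpa [hy] using hg.symm
          · rintro rfl
            refine ⟨by omega, ?_⟩
            rw [List.getD_eq_getElem?_getD, List.getElem?_eq_getElem hLlt]
            simp [hy]
        rw [countIn_shift _ _ (nodup_occUpTo flowers v (r + 1)), ← Hc v,
          PySem.Dict.getD_insert]
        by_cases hv : v = y
        · subst hv
          rw [if_pos rfl, if_pos (hmem.2 rfl)]
        · rw [if_neg hv, if_neg (fun hm => hv (hmem.1 hm))]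
          omega
      have Hc'' : ∀ v, (count.insert y (count.getD y 0 - 1)).getD v 0 =
          countIn (occUpTo flowers v (r + 1)) (((L + 1 : Nat)) : Int) := by
        intro v
        rw [show (((L + 1 : Nat)) : Int) = (L : Int) + 1 by push_cast; ring]
        exact Hc' v
      have Hother' : ∀ v, v ≠ x → (count.insert y (count.getD y 0 - 1)).getD v 0 ≤ cnt := by
        intro v hv
        rw [PySem.Dict.getD_insert]
        split_ifs with he'
        · subst he'; have := Hother y hv; omega
        · exact Hother v hv
      have hrec := ih (count.insert y (count.getD y 0 - 1)) (L + 1) (by omega) (by omega)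
        hnd' Hc'' Hother'
      rw [pvInnerA, if_pos hcond, dif_pos hLlt, ← hy, hstep]
      obtain ⟨r1, r2, r3, r4, r5, r6⟩ := hrec
      refine ⟨by omega, r2, r3, r4, r5, ?_⟩
      intro M h1 h2
      by_cases hM : M = L
      · subst hM
        rw [← Hc x]; omega
      · exact r6 M (by omega) h2
    · -- valid at L: the loop exits immediately
      rw [pvInnerA, if_neg hcond]
      have hcx : count.getD x 0 ≤ cnt := by
        have := (pv_cond_iff count cnt x hc hnd Hother).2
        by_contra h
        exact hcond (this (by omega))
      refine ⟨le_rfl, hLr, hnd, Hc, ?_, fun M h1 h2 => absurd h2 (by omega)⟩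
      rw [← Hc x]; exact hcx

-- ===== the outer fold: both step functions preserve a joint invariant =====
theorem pv_outer (flowers : List Int) (cnt : Int) (hc : 0 ≤ cnt) :
    ∀ (m r : Nat), flowers.length - r ≤ m → r ≤ flowers.length →
    ∀ (dA : PySem.Dict Int Int) (dB : PySem.Dict Int (List Int)) (ans : Int) (L : Nat),
    L ≤ r →
    dA.keys.Nodup →
    (∀ v, dA.getD v 0 = countIn (occUpTo flowers v r) (L : Int)) →
    (∀ v, dA.getD v 0 ≤ cnt) →
    (∀ v, dB.getD v [] = occUpTo flowers v r) →
    (((PySem.List.enumerate flowers).drop r).foldl (pvStepA flowers cnt) (dA, ans, L)).2.1 =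
    (((PySem.List.enumerate flowers).drop r).foldl (pvStepB cnt) (dB, ans, (L : Int))).2.1 := by
  intro m
  induction m with
  | zero =>
    intro r hfuel hrlen dA dB ans L _ _ _ _ _
    have : r = flowers.length := by omega
    subst this
    rw [List.drop_of_length_le (by rw [PySem.List.length_enumerate])]
    rfl
  | succ m ih =>
    intro r hfuel hrlen dA dB ans L hLr hnd Hc Hle HB
    by_cases hr : r < flowers.length
    · -- peel off entry r = ((r : Int), flowers[r])
      have hdrop : (PySem.List.enumerate flowers).drop r =
          ((r : Int), flowers[r]) :: (PySem.List.enumerate flowers).drop (r + 1) := by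
        rw [List.drop_eq_getElem_cons (by rw [PySem.List.length_enumerate]; exact hr)]
        congr 1
        rw [PySem.List.getElem_enumerate]
        simp
      rw [hdrop, List.foldl_cons, List.foldl_cons]
      set x := flowers[r] with hx
      -- flowers.getD r (v+1) = flowers[r] for any default
      have hgetD : ∀ w : Int, flowers.getD r w = x := by
        intro w
        rw [List.getD_eq_getElem?_getD, List.getElem?_eq_getElem hr]
        rfl
      -- the occurrence list of x up to r+1
      have hoccx : occUpTo flowers x (r + 1) = occUpTo flowers x r ++ [(r : Int)] := by
        rw [occUpTo_succ, if_pos (hgetD _)]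
      have hocc_other : ∀ v, v ≠ x → occUpTo flowers v (r + 1) = occUpTo flowers v r := by
        intro v hv
        rw [occUpTo_succ, if_neg (by rw [hgetD]; exact fun h => hv h.symm), List.append_nil]
      -- A side: the incremented counter is the window count at L for prefix r+1
      have hstep1 : dA.modify x 0 (· + 1) = dA.insert x (dA.getD x 0 + 1) :=
        pv_modify_eq_insert dA x 0 (· + 1)
      have hnd1 : (dA.insert x (dA.getD x 0 + 1)).keys.Nodup :=
        PySem.Dict.nodup_keys_insert _ _ _ hnd
      have Hc1 : ∀ v, (dA.insert x (dA.getD x 0 + 1)).getD v 0 =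
          countIn (occUpTo flowers v (r + 1)) (L : Int) := by
        intro v
        rw [PySem.Dict.getD_insert]
        by_cases hv : v = x
        · subst hv
          rw [if_pos rfl, hoccx, countIn_append, Hc x, countIn_cons, countIn_nil,
            if_pos (by exact_mod_cast hLr)]
          omega
        · rw [if_neg hv, hocc_other v hv, Hc v]
      have Hother1 : ∀ v, v ≠ x → (dA.insert x (dA.getD x 0 + 1)).getD v 0 ≤ cnt := by
        intro v hv
        rw [PySem.Dict.getD_insert, if_neg hv]
        exact Hle v
      obtain ⟨i1, i2, i3, i4, i5, i6⟩ := pv_innerA_spec flowers cnt hc x r hr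
        (r + 1) (dA.insert x (dA.getD x 0 + 1)) L (by omega) (by omega) hnd1 Hc1 Hother1
      set res := pvInnerA flowers cnt (dA.insert x (dA.getD x 0 + 1)) L with hres
      -- B side: the appended occurrence list is occUpTo x (r+1)
      have hoccB : dB.getD x [] ++ [(r : Int)] = occUpTo flowers x (r + 1) := by
        rw [HB x, hoccx]
      have hsorted : (occUpTo flowers x (r + 1)).Pairwise (· < ·) :=
        pairwise_occUpTo flowers x (r + 1)
      have hk1 : 1 ≤ (occUpTo flowers x (r + 1)).length := by
        rw [hoccx]; simp
      -- B's new left equals (res.2 : Int)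
      have hleft : (if (((occUpTo flowers x (r + 1)).length : Int) > cnt) then
          max (L : Int)
            (((PySem.List.pyGet? (occUpTo flowers x (r + 1))
              (((occUpTo flowers x (r + 1)).length : Int) - cnt - 1)).getD 0) + 1)
          else (L : Int)) = (res.2 : Int) := by
        by_cases hk : (((occUpTo flowers x (r + 1)).length : Int) > cnt)
        · rw [if_pos hk]
          have hidx0 : 0 ≤ ((occUpTo flowers x (r + 1)).length : Int) - cnt - 1 := by omega
          set j : Nat := (((occUpTo flowers x (r + 1)).length : Int) - cnt - 1).toNat with hjdef
          have hj : j < (occUpTo flowers x (r + 1)).length := by omega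
          have hjint : (j : Int) = ((occUpTo flowers x (r + 1)).length : Int) - cnt - 1 := by
            omega
          have hget : PySem.List.pyGet? (occUpTo flowers x (r + 1))
              (((occUpTo flowers x (r + 1)).length : Int) - cnt - 1) =
              some (occUpTo flowers x (r + 1))[j] := by
            rw [← hjint]
            simp [PySem.List.pyGet?_natCast, List.getElem?_eq_getElem hj]
          rw [hget, Option.getD_some]
          obtain ⟨hAt, hPast⟩ := countIn_sorted_at (occUpTo flowers x (r + 1)) hsorted j hj
          have hcntAt : countIn (occUpTo flowers x (r + 1)) (occUpTo flowers x (r + 1))[j] =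
              cnt + 1 := by rw [hAt]; omega
          have hcntPast : countIn (occUpTo flowers x (r + 1))
              ((occUpTo flowers x (r + 1))[j] + 1) = cnt := by rw [hPast]; omega
          obtain ⟨i0, hei0, hi0r⟩ := occUpTo_elem _ _ _ _ (List.getElem_mem hj)
          by_cases hcase : (i0 + 1 : Nat) ≤ L
          · -- bound before the window: L is already valid, so res.2 = L
            rw [max_eq_left (by rw [hei0]; push_cast; omega)]
            have hvalidL : countIn (occUpTo flowers x (r + 1)) (L : Int) ≤ cnt := by
              calc countIn (occUpTo flowers x (r + 1)) (L : Int)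
                  ≤ countIn (occUpTo flowers x (r + 1)) ((occUpTo flowers x (r + 1))[j] + 1) := by
                    apply countIn_mono
                    rw [hei0]; push_cast; omega
                _ = cnt := hcntPast
            have : ¬ L < res.2 := fun h => by have := i6 L le_rfl h; omega
            omega
          · -- bound after the window start: res.2 = i0 + 1
            have hmax : max (L : Int) ((occUpTo flowers x (r + 1))[j] + 1) =
                ((i0 + 1 : Nat) : Int) := by
              rw [hei0]; push_cast; omega
            rw [hmax]
            have hvalid : countIn (occUpTo flowers x (r + 1)) ((i0 + 1 : Nat) : Int) ≤ cnt := by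
              rw [show (((i0 + 1 : Nat)) : Int) = (occUpTo flowers x (r + 1))[j] + 1 by
                rw [hei0]; push_cast; ring]
              omega
            have h1 : ¬ (i0 + 1) < res.2 := fun h => by
              have := i6 (i0 + 1) (by omega) h
              omega
            have h2 : ¬ res.2 < i0 + 1 := by
              intro h
              have hLL' : ((res.2 : Nat) : Int) ≤ (occUpTo flowers x (r + 1))[j] := by
                rw [hei0]; push_cast; omega
              have := countIn_mono (occUpTo flowers x (r + 1)) hLL'
              omega
            omega
        · -- at most cnt occurrences of x up to r+1: left stays, and res.2 = L
          rw [if_neg hk]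
          have hvalidL : countIn (occUpTo flowers x (r + 1)) (L : Int) ≤ cnt :=
            le_trans (countIn_le_length _ (L : Int)) (by omega)
          have : ¬ L < res.2 := fun h => by have := i6 L le_rfl h; omega
          omega
      -- assemble one step of each fold and recurse
      have hstepA : pvStepA flowers cnt (dA, ans, L) ((r : Int), x) =
          (res.1, ans + ((r : Int) - (res.2 : Int) + 1), res.2) := by
        simp only [pvStepA, hstep1, ← hres]
      have hstepB : pvStepB cnt (dB, ans, (L : Int)) ((r : Int), x) =
          (dB.insert x (occUpTo flowers x (r + 1)),
           ans + ((r : Int) - (res.2 : Int) + 1), (res.2 : Int)) := by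
        simp only [pvStepB, hoccB, hleft]
      rw [hstepA, hstepB]
      -- invariants at r + 1
      have HB' : ∀ v, (dB.insert x (occUpTo flowers x (r + 1))).getD v [] =
          occUpTo flowers v (r + 1) := by
        intro v
        rw [PySem.Dict.getD_insert]
        by_cases hv : v = x
        · subst hv; rw [if_pos rfl]
        · rw [if_neg hv, hocc_other v hv, HB v]
      have Hle' : ∀ v, res.1.getD v 0 ≤ cnt := by
        intro v
        rw [i4 v]
        by_cases hv : v = x
        · subst hv; exact i5
        · calc countIn (occUpTo flowers v (r + 1)) ((res.2 : Nat) : Int)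
              ≤ countIn (occUpTo flowers v (r + 1)) (L : Int) := by
                apply countIn_mono; exact_mod_cast i1
            _ = (dA.insert x (dA.getD x 0 + 1)).getD v 0 := (Hc1 v).symm
            _ ≤ cnt := Hother1 v hv
      exact ih (r + 1) (by omega) (by omega) res.1 (dB.insert x (occUpTo flowers x (r + 1)))
        (ans + ((r : Int) - (res.2 : Int) + 1)) res.2 i2 i3 i4 Hle' HB'
    · have : r = flowers.length := by omega
      subst this
      rw [List.drop_of_length_le (by rw [PySem.List.length_enumerate])]
      rfl

-- ===== VERDICT (by name: the statement is the Claim_ definition above) =====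
theorem beautifulBouquet_spec : Claim_equal_beautifulBouquet := by
  intro flowers cnt _ hpre
  show beautifulBouquet flowers cnt = beautifulBouquet_alt flowers cnt
  rcases hpre with h | hc
  · subst h; rfl
  · unfold beautifulBouquet beautifulBouquet_alt
    have := pv_outer flowers cnt hc flowers.length 0 (by omega) (by omega)
      PySem.Dict.empty PySem.Dict.empty 0 0 (by omega)
      PySem.Dict.nodup_keys_empty
      (by intro v; rw [PySem.Dict.getD_empty]; rfl)
      (by intro v; rw [PySem.Dict.getD_empty]; exact hc)
      (by intro v; rw [PySem.Dict.getD_empty]; rfl)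
    simpa using this
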